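-- pv_equiv track=rewrite | github.com/matjussu/OrientIA | src/eval/metrics_det.py | _has_comparison_table
-- ===== SOURCE A (Python) =====
-- def _has_comparison_table(response: str) -> bool:
--     """Detect a markdown table with ≥ 2 rows (header + separator + data)."""
--     # A markdown table row looks like: |col1|col2|
--     # We need at least 3 pipe-lines in sequence: header, separator, data
--     lines = response.split("\n")
--     pipe_streak = 0
--     for line in lines:
--         stripped = line.strip()
--         if stripped.startswith("|") and stripped.count("|") >= 2:
--             pipe_streak += 1
--             if pipe_streak >= 3:
--                 return True
--         else:
--             pipe_streak = 0
--     return False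
-- ===== SOURCE B (Python) =====
-- def _has_comparison_table(response: str) -> bool:
--     """Detect a markdown table with >= 2 rows (header + separator + data)."""
--     def is_pipe(line):
--         s = line.strip()
--         return s.startswith("|") and s.count("|") >= 2
--     flags = [is_pipe(l) for l in response.split("\n")]
--     # group-and-measure: walk maximal runs of equal flag value
--     while flags:
--         key = flags[0]
--         run = 1
--         while run < len(flags) and flags[run] == key:
--             run += 1
--         if key and run >= 3:
--             return True
--         flags = flags[run:]
--     return False
-- ===== Notes on version B (the rewrite author's own statement) =====
-- stated objective: alternative
-- what changed: Replaces the incremental streak counter with a two-phase group-and-measure decomposition: first map every line to a pipe-row flag, then scan maximal runs of equal flags and test whether some True run has length >= 3.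
import Mathlib
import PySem

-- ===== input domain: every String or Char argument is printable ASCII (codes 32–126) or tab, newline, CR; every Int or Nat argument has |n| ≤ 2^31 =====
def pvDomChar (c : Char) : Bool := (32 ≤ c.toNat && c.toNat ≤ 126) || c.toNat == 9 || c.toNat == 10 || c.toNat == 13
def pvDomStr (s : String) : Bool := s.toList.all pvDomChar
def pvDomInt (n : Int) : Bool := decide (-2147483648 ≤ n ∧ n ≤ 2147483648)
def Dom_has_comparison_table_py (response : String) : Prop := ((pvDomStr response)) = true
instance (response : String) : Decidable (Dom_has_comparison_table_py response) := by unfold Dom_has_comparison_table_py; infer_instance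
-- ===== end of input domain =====

-- B replaces A's incremental streak counter with a map-to-flags + group-and-measure scan; same output, same cost (objective: alternative).

-- ===== PORT A =====
-- A's for-loop with the pipe_streak counter and early return, as structural recursion.
def pvLoopA : List String → Nat → Bool
  | [], _ => false
  | line :: ls, streak =>
    let stripped := PySem.Str.strip line
    if PySem.Str.startswith stripped "|" && 2 ≤ PySem.Str.count stripped "|" then
      if 3 ≤ streak + 1 then true else pvLoopA ls (streak + 1)
    else pvLoopA ls 0

def has_comparison_table_py (response : String) : Bool :=
  pvLoopA ((PySem.Str.split? response "\n").getD []) 0   -- sep "\n" ≠ "", so split? is always `some`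

-- ===== PORT B =====
def pvIsPipe (line : String) : Bool :=
  let s := PySem.Str.strip line
  PySem.Str.startswith s "|" && 2 ≤ PySem.Str.count s "|"

-- Source B's outer while: peel off one maximal run of equal flags per step.
def pvGroupScan : List Bool → Bool
  | [] => false
  | key :: bs =>
    if key && 3 ≤ (bs.takeWhile (· == key)).length + 1 then true
    else pvGroupScan (bs.dropWhile (· == key))
  termination_by flags => flags.length
  decreasing_by
    simp only [List.length_cons]
    exact Nat.lt_succ_of_le (List.length_dropWhile_le _ _)

def has_comparison_table_py_alt (response : String) : Bool :=
  pvGroupScan (((PySem.Str.split? response "\n").getD []).map pvIsPipe)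

-- ===== PRECONDITION & SPEC =====
def Spec_has_comparison_table_py (response : String) (out : Bool) : Prop := out = has_comparison_table_py_alt response
instance (response : String) (out : Bool) : Decidable (Spec_has_comparison_table_py response out) := by unfold Spec_has_comparison_table_py; infer_instance

-- ===== CLAIM (what is proved, stated in full; the proofs are below) =====
def Claim_equal_has_comparison_table_py : Prop := ∀ (response : String), Dom_has_comparison_table_py response → Spec_has_comparison_table_py response (has_comparison_table_py response)

-- ===== LEMMAS AND PROOFS =====

-- A's loop over the lines equals the same loop over the precomputed flags.
def pvBoolLoopA : List Bool → Nat → Bool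
  | [], _ => false
  | b :: bs, streak =>
    if b then (if 3 ≤ streak + 1 then true else pvBoolLoopA bs (streak + 1))
    else pvBoolLoopA bs 0

theorem pvLoopA_eq_bool (ls : List String) : ∀ s, pvLoopA ls s = pvBoolLoopA (ls.map pvIsPipe) s := by
  induction ls with
  | nil => intro s; rfl
  | cons l ls ih =>
    intro s
    simp only [pvLoopA, pvBoolLoopA, List.map_cons, pvIsPipe]
    by_cases h : (PySem.Str.startswith (PySem.Str.strip l) "|" && 2 ≤ PySem.Str.count (PySem.Str.strip l) "|") = true
    · simp only [if_pos h]; by_cases h3 : 3 ≤ s + 1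
      · simp [h3]
      · simp [h3, ih]
    · simp only [if_neg h]; exact ih 0

-- streak resets: a run of false flags is skipped by A's loop
theorem pvBoolLoopA_false_run (run : List Bool) (h : ∀ x ∈ run, x = false) :
    ∀ rest, pvBoolLoopA (run ++ rest) 0 = pvBoolLoopA rest 0 := by
  induction run with
  | nil => intro rest; rfl
  | cons b bs ih =>
    intro rest
    have hb : b = false := h b (by simp)
    subst hb
    simp only [List.cons_append, pvBoolLoopA]
    exact ih (fun x hx => h x (by simp [hx])) rest

-- A's loop through a run of true flags: early return iff the run pushes the streak to 3
theorem pvBoolLoopA_true_run (run : List Bool) (h : ∀ x ∈ run, x = true) :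
    ∀ s rest, s ≤ 2 →
      pvBoolLoopA (run ++ rest) s =
        (if 3 ≤ s + run.length then true else pvBoolLoopA rest (s + run.length)) := by
  induction run with
  | nil =>
    intro s rest hs
    simp only [List.nil_append, List.length_nil, Nat.add_zero]
    rw [if_neg (by omega)]
  | cons b bs ih =>
    intro s rest hs
    have hb : b = true := h b (by simp)
    subst hb
    simp only [List.cons_append, pvBoolLoopA, if_true, List.length_cons]
    by_cases h3 : 3 ≤ s + 1
    · rw [if_pos h3, if_pos (show 3 ≤ s + (bs.length + 1) by omega)]
    · rw [if_neg h3, ih (fun x hx => h x (by simp [hx])) (s + 1) rest (by omega)]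
      rw [show s + 1 + bs.length = s + (bs.length + 1) by omega]

-- A's loop doesn't care about an incoming streak when the list is empty or starts with false
theorem pvBoolLoopA_reset (rest : List Bool) (h : rest.head? = none ∨ rest.head? = some false) :
    ∀ s, pvBoolLoopA rest s = pvBoolLoopA rest 0 := by
  intro s
  cases rest with
  | nil => rfl
  | cons b bs =>
    rcases h with h | h
    · simp at h
    · simp only [List.head?_cons, Option.some.injEq] at h
      subst h
      rfl

theorem pvBoolLoopA_eq_groupScan_aux : ∀ (n : Nat) (flags : List Bool), flags.length ≤ n →
    pvBoolLoopA flags 0 = pvGroupScan flags := by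
  intro n
  induction n with
  | zero =>
    intro flags h
    have : flags = [] := List.eq_nil_of_length_eq_zero (Nat.le_zero.mp h)
    subst this; simp [pvBoolLoopA, pvGroupScan]
  | succ n ih =>
    intro flags h
    cases flags with
    | nil => simp [pvBoolLoopA, pvGroupScan]
    | cons key bs =>
      have hbs : bs.takeWhile (· == key) ++ bs.dropWhile (· == key) = bs :=
        List.takeWhile_append_dropWhile
      have hlen : (bs.dropWhile (· == key)).length ≤ n := by
        have := List.length_dropWhile_le (· == key) bs
        simp only [List.length_cons] at h
        omega
      have hrun : ∀ x ∈ bs.takeWhile (· == key), x = key := by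
        intro x hx
        simpa using List.mem_takeWhile_imp hx
      cases key with
      | false =>
        have lhs : pvBoolLoopA (false :: bs) 0 = pvBoolLoopA (bs.dropWhile (· == false)) 0 := by
          conv_lhs => rw [show pvBoolLoopA (false :: bs) 0 = pvBoolLoopA bs 0 from rfl, ← hbs]
          exact pvBoolLoopA_false_run _ hrun _
        rw [lhs, ih _ hlen]
        conv_rhs => rw [pvGroupScan]
        simp
      | true =>
        have hhead : (bs.dropWhile (· == true)).head? = none ∨
            (bs.dropWhile (· == true)).head? = some false := by
          have := List.head?_dropWhile_not (· == true) bs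
          cases hh : (bs.dropWhile (· == true)).head? with
          | none => exact Or.inl rfl
          | some x =>
            rw [hh] at this
            simp only [] at this
            right
            cases x
            · rfl
            · simp at this
        have lhs : pvBoolLoopA (true :: bs) 0
            = pvBoolLoopA (bs.takeWhile (· == true) ++ bs.dropWhile (· == true)) 1 := by
          rw [hbs]; rfl
        rw [lhs, pvBoolLoopA_true_run _ hrun 1 _ (by omega)]
        conv_rhs => rw [pvGroupScan]
        simp only [Bool.true_and, decide_eq_true_eq]
        by_cases h3 : 3 ≤ 1 + (bs.takeWhile (· == true)).length
        · rw [if_pos h3, if_pos (show 3 ≤ (bs.takeWhile (· == true)).length + 1 by omega)]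
        · rw [if_neg h3, if_neg (show ¬ 3 ≤ (bs.takeWhile (· == true)).length + 1 by omega)]
          rw [pvBoolLoopA_reset _ hhead, ih _ hlen]

theorem pvBoolLoopA_eq_groupScan (flags : List Bool) : pvBoolLoopA flags 0 = pvGroupScan flags :=
  pvBoolLoopA_eq_groupScan_aux flags.length flags (le_refl _)

-- ===== VERDICT (by name: the statement is the Claim_ definition above) =====
theorem has_comparison_table_py_spec : Claim_equal_has_comparison_table_py := by
  intro response _
  unfold Spec_has_comparison_table_py has_comparison_table_py has_comparison_table_py_alt
  rw [pvLoopA_eq_bool, pvBoolLoopA_eq_groupScan]
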